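-- pv_equiv track=rewrite | github.com/leeibo/RoboTwin_Astribot | script/export_rotate_object_search_visibility_memory_v2.py | _iter_subtask_spans
-- ===== SOURCE A (Python) =====
-- from typing import Any
--
-- def _iter_subtask_spans(annotations: list[dict[str, Any]]) -> list[tuple[int, int]]:
--     if not annotations:
--         return []
--     spans: list[tuple[int, int]] = []
--     start = 0
--     prev_subtask = int(annotations[0].get("subtask", 0) or 0)
--     for idx in range(1, len(annotations)):
--         subtask = int(annotations[idx].get("subtask", 0) or 0)
--         if subtask != prev_subtask:
--             spans.append((start, idx))
--             start = idx
--             prev_subtask = subtask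
--     spans.append((start, len(annotations)))
--     return spans
-- ===== SOURCE B (Python) =====
-- def _iter_subtask_spans(annotations):
--     def _key(a):
--         return int(a.get("subtask", 0) or 0)
--
--     def _go(items, start):
--         if not items:
--             return []
--         k = _key(items[0])
--         run = 1
--         for x in items[1:]:
--             if _key(x) != k:
--                 break
--             run += 1
--         return [(start, start + run)] + _go(items[run:], start + run)
--
--     return _go(annotations, 0)
-- ===== Notes on version B (the rewrite author's own statement) =====
-- stated objective: alternative
-- what changed: A's single index loop carrying (spans, start, prev_subtask) state is replaced by a recursive chunk consumer: each call measures the maximal leading run of equal keys, emits one span, and recurses on the remaining suffix with an advanced start offset.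
import Mathlib
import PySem

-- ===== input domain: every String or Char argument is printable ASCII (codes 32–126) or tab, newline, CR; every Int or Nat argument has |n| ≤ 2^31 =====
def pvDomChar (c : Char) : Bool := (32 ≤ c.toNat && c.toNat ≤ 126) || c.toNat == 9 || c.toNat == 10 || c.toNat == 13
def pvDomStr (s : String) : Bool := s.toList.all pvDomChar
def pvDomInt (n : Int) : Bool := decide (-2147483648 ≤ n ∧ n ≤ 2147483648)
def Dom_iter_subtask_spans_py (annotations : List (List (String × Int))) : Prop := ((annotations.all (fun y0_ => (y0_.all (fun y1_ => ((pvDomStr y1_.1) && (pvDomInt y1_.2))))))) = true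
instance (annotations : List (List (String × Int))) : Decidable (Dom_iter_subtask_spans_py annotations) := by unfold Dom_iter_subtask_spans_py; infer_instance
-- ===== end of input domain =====

-- B replaces A's single stateful index loop by a recursive chunk consumer: measure the
-- maximal leading run of equal keys, emit one span, recurse on the rest (objective: alternative).

-- `int(a.get("subtask", 0) or 0)` — shared subexpression of both Pythons
def subtaskKey (a : List (String × Int)) : Int :=
  let v := (PySem.Dict.mk a).getD "subtask" 0
  if v == 0 then 0 else v

-- ===== PORT A =====
def iter_subtask_spans_py (annotations : List (List (String × Int))) : List (Int × Int) :=
  if annotations = [] then []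
  else
    let prev0 := subtaskKey (PySem.List.pyGetD annotations 0 [])
    let st := (PySem.List.pyRange 1 (annotations.length : Int) 1).foldl
      (fun (s : List (Int × Int) × Int × Int) idx =>
        let subtask := subtaskKey (PySem.List.pyGetD annotations idx [])
        if subtask != s.2.2 then (s.1 ++ [(s.2.1, idx)], idx, subtask) else s)
      ([], 0, prev0)
    st.1 ++ [(st.2.1, (annotations.length : Int))]

-- ===== PORT B =====
-- Source B's `_go(items, start)`: the `for … break` run-counting loop computes exactly
-- 1 + the length of the matching prefix of items[1:] (ported as takeWhile);
-- `items[run:]` with 0 ≤ run ≤ len(items) is `drop run`.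
def goB (items : List (List (String × Int))) (start : Int) : List (Int × Int) :=
  match items with
  | [] => []
  | a :: rest =>
    let k := subtaskKey a
    let run : Nat := 1 + (rest.takeWhile (fun x => subtaskKey x == k)).length
    (start, start + (run : Int)) :: goB ((a :: rest).drop run) (start + (run : Int))
termination_by items.length
decreasing_by
  simp

def iter_subtask_spans_py_alt (annotations : List (List (String × Int))) : List (Int × Int) :=
  goB annotations 0

-- ===== PRECONDITION & SPEC =====
def Spec_iter_subtask_spans_py (annotations : List (List (String × Int))) (out : List (Int × Int)) : Prop := out = iter_subtask_spans_py_alt annotations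
instance (annotations : List (List (String × Int))) (out : List (Int × Int)) : Decidable (Spec_iter_subtask_spans_py annotations out) := by unfold Spec_iter_subtask_spans_py; infer_instance

-- ===== CLAIM (what is proved, stated in full; the proofs are below) =====
def Claim_equal_iter_subtask_spans_py : Prop := ∀ (annotations : List (List (String × Int))), Dom_iter_subtask_spans_py annotations → Spec_iter_subtask_spans_py annotations (iter_subtask_spans_py annotations)

-- ===== LEMMAS AND PROOFS =====

-- structural mirror of A's loop body, over the key list, carrying the same state
def fold2 (s : List (Int × Int) × Int × Int) (idx : Int) : List Int → List (Int × Int) × Int × Int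
  | [] => s
  | kk :: ks =>
    if kk != s.2.2 then fold2 (s.1 ++ [(s.2.1, idx)], idx, kk) (idx + 1) ks
    else fold2 s (idx + 1) ks

-- B's recursion, restated on the key list
def goKeys : List Int → Int → List (Int × Int)
  | [], _ => []
  | a :: t, s =>
    let r := (t.takeWhile (fun x => x == a)).length
    (s, s + 1 + (r : Int)) :: goKeys (t.drop r) (s + 1 + (r : Int))
termination_by ks _ => ks.length
decreasing_by
  simp

theorem goKeys_nil (s : Int) : goKeys [] s = [] := by
  unfold goKeys
  rfl

theorem goKeys_cons (a : Int) (t : List Int) (s : Int) :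
    goKeys (a :: t) s
      = (s, s + 1 + ((t.takeWhile (fun x => x == a)).length : Int)) ::
        goKeys (t.drop (t.takeWhile (fun x => x == a)).length)
          (s + 1 + ((t.takeWhile (fun x => x == a)).length : Int)) := by
  conv_lhs => unfold goKeys

theorem goB_nil (s : Int) : goB [] s = [] := by
  unfold goB
  rfl

theorem goB_cons (a : List (String × Int)) (rest : List (List (String × Int))) (s : Int) :
    goB (a :: rest) s
      = (s, s + ((1 + (rest.takeWhile (fun x => subtaskKey x == subtaskKey a)).length : Nat) : Int)) ::
        goB (rest.drop (rest.takeWhile (fun x => subtaskKey x == subtaskKey a)).length)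
          (s + ((1 + (rest.takeWhile (fun x => subtaskKey x == subtaskKey a)).length : Nat) : Int)) := by
  conv_lhs => unfold goB
  simp only [Nat.cast_add, Nat.cast_one]
  congr 1
  rw [Nat.add_comm, List.drop_succ_cons]

theorem key_bridge (annotations : List (List (String × Int))) (i : Int) :
    subtaskKey (PySem.List.pyGetD annotations i []) =
      PySem.List.pyGetD (annotations.map subtaskKey) i 0 := by
  rw [show (0:Int) = subtaskKey [] from rfl, PySem.List.pyGetD_map]

-- A's index fold over range(j, len) equals the structural fold over the dropped key list
theorem rangeFold (k : List Int) : ∀ (m j : Nat) (jZ : Int) (s : List (Int × Int) × Int × Int),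
    k.length - j = m → j ≤ k.length → jZ = (j : Int) →
    (PySem.List.pyRange jZ (k.length : Int) 1).foldl
      (fun s idx =>
        let subtask := PySem.List.pyGetD k idx 0
        if subtask != s.2.2 then (s.1 ++ [(s.2.1, idx)], idx, subtask) else s)
      s
    = fold2 s jZ (k.drop j) := by
  intro m
  induction m with
  | zero =>
    intro j jZ s hm hj hz
    have hj' : j = k.length := by omega
    subst hz; subst hj'
    simp [PySem.List.pyRange_one_eq_nil, fold2]
  | succ m ih =>
    intro j jZ s hm hj hz
    subst hz
    have hjlt : j < k.length := by omega
    have hcons : PySem.List.pyRange (j : Int) (k.length : Int) 1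
        = (j : Int) :: PySem.List.pyRange ((j : Int) + 1) (k.length : Int) 1 :=
      PySem.List.pyRange_one_cons (by exact_mod_cast hjlt)
    have hget : PySem.List.pyGetD k (j : Int) 0 = k[j] := by
      rw [PySem.List.pyGetD_natCast]
      exact List.getD_eq_getElem k 0 hjlt
    have hdrop : k.drop j = k[j] :: k.drop (j + 1) := List.drop_eq_getElem_cons hjlt
    rw [hcons, List.foldl_cons, hdrop]
    simp only [hget, fold2]
    by_cases hne : (k[j] != s.2.2) = true
    · simp only [hne, if_pos]
      exact ih (j + 1) _ _ (by omega) (by omega) (by push_cast; ring)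
    · simp only [Bool.not_eq_true] at hne
      simp only [hne, Bool.false_eq_true, if_false]
      exact ih (j + 1) _ _ (by omega) (by omega) (by push_cast; ring)

-- the central bridge: A's stateful fold, finished off with the final span, is B's chunk recursion
theorem fold2_goKeys : ∀ (ks : List Int) (p start idx : Int) (acc : List (Int × Int)),
    (fold2 (acc, start, p) idx ks).1 ++ [((fold2 (acc, start, p) idx ks).2.1, idx + (ks.length : Int))]
    = acc ++ (start, idx + ((ks.takeWhile (fun x => x == p)).length : Int)) ::
        goKeys (ks.drop (ks.takeWhile (fun x => x == p)).length)
          (idx + ((ks.takeWhile (fun x => x == p)).length : Int)) := by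
  intro ks
  induction ks with
  | nil =>
    intro p start idx acc
    simp [fold2, goKeys_nil]
  | cons kk ks ih =>
    intro p start idx acc
    by_cases heq : (kk == p) = true
    · have hkp : kk = p := by simpa using heq
      subst hkp
      rw [List.takeWhile_cons_of_pos (by simp)]
      simp only [fold2, bne_self_eq_false, Bool.false_eq_true, if_false,
        List.length_cons, List.drop_succ_cons, Nat.cast_add, Nat.cast_one]
      rw [show idx + ((ks.length : Int) + 1) = idx + 1 + (ks.length : Int) by ring,
          show idx + ((((ks.takeWhile (fun x => x == kk)).length : Int)) + 1)
             = idx + 1 + (((ks.takeWhile (fun x => x == kk)).length : Int)) by ring]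
      exact ih kk start (idx + 1) acc
    · have hne : (kk != p) = true := by simp_all
      rw [List.takeWhile_cons_of_neg (by exact heq)]
      simp only [fold2, hne, if_true, List.length_nil, List.drop_zero,
        Nat.cast_zero, add_zero, List.length_cons, Nat.cast_add, Nat.cast_one]
      rw [show idx + ((ks.length : Int) + 1) = idx + 1 + (ks.length : Int) by ring]
      rw [ih kk idx (idx + 1) (acc ++ [(start, idx)])]
      rw [goKeys_cons]
      simp [List.append_assoc, add_assoc]

-- B's port on annotations is goKeys on the mapped keys
theorem goB_goKeys : ∀ (m : Nat) (items : List (List (String × Int))) (start : Int),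
    items.length ≤ m → goB items start = goKeys (items.map subtaskKey) start := by
  intro m
  induction m with
  | zero =>
    intro items start h
    have : items = [] := List.eq_nil_of_length_eq_zero (by omega)
    subst this
    rw [goB_nil, List.map_nil, goKeys_nil]
  | succ m ih =>
    intro items start h
    match items with
    | [] => rw [goB_nil, List.map_nil, goKeys_nil]
    | a :: rest =>
      rw [goB_cons, List.map_cons, goKeys_cons]
      have hlen : ((rest.map subtaskKey).takeWhile (fun x => x == subtaskKey a)).length
          = (rest.takeWhile (fun x => subtaskKey x == subtaskKey a)).length := by
        rw [List.takeWhile_map, List.length_map]; rfl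
      rw [hlen, ← List.map_drop]
      congr 1
      · congr 1
        push_cast
        ring
      · rw [ih]
        · congr 1
          push_cast; ring
        · simp only [List.length_cons] at h
          have := List.length_drop
            (i := (rest.takeWhile (fun x => subtaskKey x == subtaskKey a)).length) (l := rest)
          omega

-- ===== VERDICT (by name: the statement is the Claim_ definition above) =====
theorem iter_subtask_spans_py_spec : Claim_equal_iter_subtask_spans_py := by
  intro ann _
  unfold Spec_iter_subtask_spans_py iter_subtask_spans_py iter_subtask_spans_py_alt
  by_cases h : ann = []
  · simp [h, goB_nil]
  · simp only [h, if_false]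
    match ann, h with
    | a :: rest, _ =>
      have hfun : (fun (s : List (Int × Int) × Int × Int) idx =>
          let subtask := subtaskKey (PySem.List.pyGetD (a :: rest) idx [])
          if subtask != s.2.2 then (s.1 ++ [(s.2.1, idx)], idx, subtask) else s)
        = (fun (s : List (Int × Int) × Int × Int) idx =>
          let subtask := PySem.List.pyGetD ((a :: rest).map subtaskKey) idx 0
          if subtask != s.2.2 then (s.1 ++ [(s.2.1, idx)], idx, subtask) else s) := by
        funext s idx; simp only [key_bridge]
      have hk0 : subtaskKey (PySem.List.pyGetD (a :: rest) 0 []) = subtaskKey a := by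
        simp [PySem.List.pyGetD]
      rw [hk0, hfun]
      have h1 : ((a :: rest).length : Int) = (((a :: rest).map subtaskKey).length : Int) := by
        rw [List.length_map]
      rw [h1, rangeFold ((a :: rest).map subtaskKey) (((a :: rest).map subtaskKey).length - 1)
            1 1 ([], 0, subtaskKey a) rfl (by simp) (by norm_num)]
      have hdrop1 : ((a :: rest).map subtaskKey).drop 1 = rest.map subtaskKey := by
        simp
      rw [hdrop1,
        show (((a :: rest).map subtaskKey).length : Int)
            = 1 + ((rest.map subtaskKey).length : Int) by
          simp only [List.map_cons, List.length_cons, List.length_map]; push_cast; ring,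
        show (1 : Int) + ((rest.map subtaskKey).length : Int)
            = 1 + ((rest.map subtaskKey).length : Int) from rfl]
      rw [fold2_goKeys (rest.map subtaskKey) (subtaskKey a) 0 1 []]
      rw [goB_goKeys ((a :: rest).length) (a :: rest) 0 (le_refl _), List.map_cons, goKeys_cons]
      rw [List.takeWhile_map, List.length_map]
      simp only [List.nil_append]
      congr 1
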